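-- pv_equiv track=rewrite | github.com/Valentin-Guillet/dotfiles | .config/fuzzy_complete/fuzzy_lib.py | name_match
-- ===== SOURCE A (Python) =====
-- def name_match(pattern, name):
--     """ Check if a name matches a pattern, with potentially missing characters.
--     For instance, `dcm` match `documents` and `decimal`, but not `dmc` nor 'declaration'.
--     If the pattern doesn't have any uppercase, the check is case insensitive.
--     """
--     if pattern.islower():
--         name = name.lower()
--
--     prev_index = 0
--     for char in pattern:
--         if char not in name[prev_index:]:
--             return False
--
--         index = name.index(char, prev_index)
--         if index < prev_index:
--             return False
--
--         prev_index = index + 1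
--
--     return True
-- ===== SOURCE B (Python) =====
-- def name_match(pattern, name):
--     """Check if pattern is a (case-aware) subsequence of name, by indexing name
--     once: a dict mapping each character to its sorted occurrence positions, then
--     a binary search per pattern character for the first position past the cursor."""
--     if pattern.islower():
--         name = name.lower()
--
--     pos = {}
--     for i, c in enumerate(name):
--         pos.setdefault(c, []).append(i)
--
--     prev = 0
--     for c in pattern:
--         lst = pos.get(c)
--         if lst is None:
--             return False
--         lo, hi = 0, len(lst)
--         while lo < hi:
--             mid = (lo + hi) // 2
--             if lst[mid] < prev:
--                 lo = mid + 1
--             else: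
--                 hi = mid
--         if lo == len(lst):
--             return False
--         prev = lst[lo] + 1
--     return True
-- ===== Notes on version B (the rewrite author's own statement) =====
-- stated objective: faster
-- what changed: Replaced A's per-pattern-character substring test plus str.index rescan of name by a precomputed occurrence index (dict char -> sorted position list built in one pass over name) queried with a hand-written binary search per pattern character.
import Mathlib
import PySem

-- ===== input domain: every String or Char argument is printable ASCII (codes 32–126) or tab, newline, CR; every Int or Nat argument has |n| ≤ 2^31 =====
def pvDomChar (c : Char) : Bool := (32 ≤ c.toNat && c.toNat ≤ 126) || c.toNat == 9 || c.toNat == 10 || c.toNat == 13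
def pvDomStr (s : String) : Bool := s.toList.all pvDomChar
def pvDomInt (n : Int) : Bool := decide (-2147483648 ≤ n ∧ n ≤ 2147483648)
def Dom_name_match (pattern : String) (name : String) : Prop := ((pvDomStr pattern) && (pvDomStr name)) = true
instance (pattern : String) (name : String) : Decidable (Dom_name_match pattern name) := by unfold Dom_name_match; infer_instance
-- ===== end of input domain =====

-- B replaces A's per-character substring test + str.index rescan by a precomputed
-- occurrence-position index of name queried by binary search (objective: faster).

-- ===== PORT A =====
-- str.islower(): at least one cased character and no uppercase one (exact on the ASCII domain,
-- where the cased characters are exactly the letters). Used by both Pythons' first line.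
def pyStrIslower (cs : List Char) : Bool :=
  cs.any (fun c => PySem.Chars.islower c) && cs.all (fun c => !(PySem.Chars.isupper c))

-- A's for-loop over pattern, carrying prev_index (the `index < prev_index` branch is A's code, kept)
def nameMatchLoopA (name : List Char) : List Char → Int → Bool
  | [], _ => true
  | c :: rest, prev =>
    if PySem.Chars.isIn [c] (PySem.List.slice name (some prev) none) = false then false
    else
      let index := PySem.Chars.findFrom name [c] prev none
      if index < prev then false
      else nameMatchLoopA name rest (index + 1)

def name_match (pattern : String) (name : String) : Bool :=
  let nm := if pyStrIslower pattern.toList then PySem.Chars.lower name.toList else name.toList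
  nameMatchLoopA nm pattern.toList 0

-- ===== PORT B =====
-- Source B's hand-written `while lo < hi` binary search (first slot of lst[lo:hi] with value ≥ prev);
-- lst[mid] is ported as getD with default 0: mid is always in range, so the default is never read;
-- the extra fuel argument (called with lst.length ≥ hi - lo) only makes the loop structurally total.
def nmBsearch (lst : List Int) (prev : Int) : Nat → Nat → Nat → Nat
  | 0, lo, _ => lo
  | fuel + 1, lo, hi =>
    if lo < hi then
      let mid := (lo + hi) / 2
      if lst.getD mid 0 < prev then nmBsearch lst prev fuel (mid + 1) hi
      else nmBsearch lst prev fuel lo mid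
    else lo

-- Source B's `for i, c in enumerate(name): pos.setdefault(c, []).append(i)`
def nmPosDict (nm : List Char) : PySem.Dict Char (List Int) :=
  (PySem.List.enumerate nm 0).foldl (fun d p => d.modify p.2 [] (· ++ [p.1])) PySem.Dict.empty

-- Source B's for-loop over pattern, carrying prev (lst[lo] ported as getD: lo < len(lst) is checked)
def nmLoopB (pos : PySem.Dict Char (List Int)) : List Char → Int → Bool
  | [], _ => true
  | c :: rest, prev =>
    match pos.get? c with
    | none => false
    | some lst =>
      let lo := nmBsearch lst prev lst.length 0 lst.length
      if lo = lst.length then false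
      else nmLoopB pos rest (lst.getD lo 0 + 1)

def name_match_alt (pattern : String) (name : String) : Bool :=
  let nm := if pyStrIslower pattern.toList then PySem.Chars.lower name.toList else name.toList
  nmLoopB (nmPosDict nm) pattern.toList 0

-- ===== PRECONDITION & SPEC =====
def Spec_name_match (pattern : String) (name : String) (out : Bool) : Prop := out = name_match_alt pattern name
instance (pattern : String) (name : String) (out : Bool) : Decidable (Spec_name_match pattern name out) := by unfold Spec_name_match; infer_instance

-- ===== CLAIM (what is proved, stated in full; the proofs are below) =====
def Claim_equal_name_match : Prop := ∀ (pattern : String) (name : String), Dom_name_match pattern name → Spec_name_match pattern name (name_match pattern name)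

-- ===== LEMMAS AND PROOFS =====

-- reference scan: pattern is a subsequence of the remaining name (greedy, one cursor)
def nmScan : List Char → List Char → Bool
  | [], _ => true
  | _ :: _, [] => false
  | p :: ps, n :: ns => if n == p then nmScan ps ns else nmScan (p :: ps) ns

theorem singleton_prefix_iff (c : Char) (l : List Char) :
    [c] <+: l ↔ ∃ h : 0 < l.length, l[0] = c := by
  cases l with
  | nil => simp
  | cons a t =>
    constructor
    · rintro ⟨s, hs⟩; simp at hs; simp [hs.1]
    · rintro ⟨h, h0⟩; simp at h0; exact ⟨t, by simp [h0]⟩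

theorem singleton_infix_iff (c : Char) (l : List Char) :
    [c] <:+: l ↔ c ∈ l := by
  constructor
  · rintro ⟨s, t, h⟩; subst h; simp
  · intro h
    obtain ⟨s, t, h⟩ := List.append_of_mem h
    exact ⟨s, t, by simp [h]⟩

theorem nmScan_not_mem (p : Char) (ps ns : List Char) (h : p ∉ ns) :
    nmScan (p :: ps) ns = false := by
  induction ns with
  | nil => rfl
  | cons n ns ih =>
    simp at h
    simp [nmScan, beq_iff_eq, Ne.symm h.1, ih h.2]

theorem nmScan_first (p : Char) (ps : List Char) :
    ∀ (ns : List Char) (j : Nat) (hj : j < ns.length),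
      ns[j] = p → (∀ i (hi : i < j), ns[i]'(by omega) ≠ p) →
      nmScan (p :: ps) ns = nmScan ps (ns.drop (j + 1)) := by
  intro ns
  induction ns with
  | nil => intro j hj; simp at hj
  | cons n ns ih =>
    intro j hj hget hmin
    cases j with
    | zero => simp_all [nmScan]
    | succ j =>
      have hne : n ≠ p := hmin 0 (by omega)
      rw [show nmScan (p :: ps) (n :: ns) = nmScan (p :: ps) ns by
            simp [nmScan, beq_iff_eq, hne]]
      rw [List.drop_succ_cons]
      simp only [List.getElem_cons_succ] at hget
      exact ih j (by simpa using hj) hget (fun i hi => hmin (i + 1) (by omega))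

theorem loopA_eq_scan (name pattern : List Char) :
    ∀ (k : Nat), k ≤ name.length →
      nameMatchLoopA name pattern (k : Int) = nmScan pattern (name.drop k) := by
  induction pattern with
  | nil => intro k hk; rw [nameMatchLoopA, nmScan]
  | cons c rest ih =>
    intro k hk
    rw [nameMatchLoopA]
    rw [PySem.List.slice_from_natCast]
    by_cases hmem : c ∈ name.drop k
    · have hinf : [c] <:+: name.drop k := (singleton_infix_iff c _).2 hmem
      have hIn : PySem.Chars.isIn [c] (name.drop k) = true :=
        (PySem.Chars.isIn_iff_infix _ _).2 hinf
      rw [hIn, if_neg (by simp)]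
      have hfne : PySem.Chars.find (name.drop k) [c] ≠ -1 :=
        (PySem.Chars.find_ne_neg_one_iff _ _).2 hinf
      have hfnn : 0 ≤ PySem.Chars.find (name.drop k) [c] :=
        (PySem.Chars.find_nonneg_iff _ _).2 hinf
      have hfind : PySem.Chars.findFrom name [c] (↑k) none
          = (k : Int) + PySem.Chars.find (name.drop k) [c] := by
        rw [PySem.Chars.findFrom_natCast name [c] k hk, if_neg hfne]
      obtain ⟨hpre, hminp⟩ :=
        PySem.Chars.find_spec (s := name.drop k) (sub := [c]) hfnn
      rw [singleton_prefix_iff] at hpre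
      obtain ⟨hlt0, hat0⟩ := hpre
      have htlt : (PySem.Chars.find (name.drop k) [c]).toNat < (name.drop k).length := by
        rw [List.length_drop] at hlt0; omega
      have hatl : (name.drop k)[(PySem.Chars.find (name.drop k) [c]).toNat]'htlt = c := by
        simpa [List.getElem_drop] using hat0
      have hmin' : ∀ i (hi : i < (PySem.Chars.find (name.drop k) [c]).toNat),
          (name.drop k)[i]'(by omega) ≠ c := by
        intro i hi hc
        apply hminp i hi
        have hilen : i < (name.drop k).length := by omega
        rw [List.drop_eq_getElem_cons hilen, hc]
        exact ⟨_, rfl⟩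
      rw [hfind]
      have hnotlt : ¬ ((k : Int) + PySem.Chars.find (name.drop k) [c] < (k : Int)) := by omega
      rw [if_neg hnotlt]
      have hcast : ((k : Int) + PySem.Chars.find (name.drop k) [c] + 1)
          = (((PySem.Chars.find (name.drop k) [c]).toNat + 1 + k : Nat) : Int) := by
        push_cast; omega
      have hklen : (PySem.Chars.find (name.drop k) [c]).toNat + 1 + k ≤ name.length := by
        rw [List.length_drop] at htlt; omega
      rw [hcast, ih ((PySem.Chars.find (name.drop k) [c]).toNat + 1 + k) hklen]
      rw [nmScan_first c rest (name.drop k) (PySem.Chars.find (name.drop k) [c]).toNat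
            htlt hatl hmin']
      rw [List.drop_drop,
        show (PySem.Chars.find (name.drop k) [c]).toNat + 1 + k
            = k + ((PySem.Chars.find (name.drop k) [c]).toNat + 1) from by omega]
    · have hninf : ¬ [c] <:+: name.drop k := fun h => hmem ((singleton_infix_iff c _).1 h)
      have hIn : PySem.Chars.isIn [c] (name.drop k) = false :=
        (PySem.Chars.isIn_eq_false_iff _ _).2 hninf
      rw [hIn, if_pos rfl, nmScan_not_mem c rest _ hmem]

-- ===== B-side lemmas =====

-- the occurrence-position list of c in nm, as Source B's dict stores it
def nmPosL (nm : List Char) (c : Char) : List Int :=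
  ((PySem.List.enumerate nm 0).filter (fun p => p.2 == c)).map (·.1)

theorem nmPosDict_getD (nm : List Char) (c : Char) :
    (nmPosDict nm).getD c [] = nmPosL nm c := by
  unfold nmPosDict nmPosL
  rw [show (PySem.List.enumerate nm 0).foldl
        (fun d p => d.modify p.2 [] (· ++ [p.1])) PySem.Dict.empty
      = ((PySem.List.enumerate nm 0).map Prod.swap).foldl
        (fun d p => d.modify p.1 [] (· ++ [p.2])) PySem.Dict.empty from by
        rw [List.foldl_map]; rfl]
  rw [PySem.Dict.getD_foldl_modify_append]
  simp [List.filter_map, List.map_map, Function.comp_def]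

theorem nmPosDict_get?_eq_none (nm : List Char) (c : Char) :
    ((nmPosDict nm).get? c = none) ↔ c ∉ nm := by
  rw [PySem.Dict.get?_eq_none_iff_not_mem_keys]
  unfold nmPosDict
  rw [PySem.Dict.keys_foldl_modify_key (key := fun p : Int × Char => p.2)]
  simp [PySem.List.map_snd_enumerate]

theorem mem_nmPosL (nm : List Char) (c : Char) (x : Int) :
    x ∈ nmPosL nm c ↔ ∃ (j : Nat) (h : j < nm.length), x = (j : Int) ∧ nm[j] = c := by
  unfold nmPosL
  simp only [List.mem_map, List.mem_filter, PySem.List.mem_enumerate_iff, beq_iff_eq]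
  constructor
  · rintro ⟨p, ⟨⟨j, hj, rfl⟩, hc⟩, rfl⟩
    exact ⟨j, hj, by simp, hc⟩
  · rintro ⟨j, hj, rfl, hc⟩
    exact ⟨(0 + (j : Int), nm[j]), ⟨⟨j, hj, rfl⟩, hc⟩, by simp⟩

theorem nmPosL_pairwise (nm : List Char) (c : Char) :
    (nmPosL nm c).Pairwise (· < ·) := by
  unfold nmPosL
  exact List.Pairwise.map _ (fun a b h => h)
    ((PySem.List.pairwise_lt_enumerate nm 0).filter _)

theorem nmPosL_mono (nm : List Char) (c : Char) {i j : Nat}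
    (hij : i ≤ j) (hj : j < (nmPosL nm c).length) :
    (nmPosL nm c).getD i 0 ≤ (nmPosL nm c).getD j 0 := by
  rcases Nat.eq_or_lt_of_le hij with rfl | hlt
  · exact le_refl _
  · rw [List.getD_eq_getElem _ _ (by omega), List.getD_eq_getElem _ _ hj]
    exact le_of_lt ((List.pairwise_iff_getElem.1 (nmPosL_pairwise nm c)) i j (by omega) hj hlt)

-- binary-search invariant: nmBsearch returns the boundary between < prev and ≥ prev
theorem nmBsearch_spec (lst : List Int) (prev : Int) :
    ∀ (fuel lo hi : Nat), hi - lo ≤ fuel → lo ≤ hi → hi ≤ lst.length →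
      (∀ i, i < lo → lst.getD i 0 < prev) →
      (∀ i, hi ≤ i → i < lst.length → ¬ lst.getD i 0 < prev) →
      (∀ i j, i ≤ j → j < lst.length → lst.getD i 0 ≤ lst.getD j 0) →
      nmBsearch lst prev fuel lo hi ≤ lst.length ∧
      (∀ i, i < nmBsearch lst prev fuel lo hi → lst.getD i 0 < prev) ∧
      (∀ i, nmBsearch lst prev fuel lo hi ≤ i → i < lst.length → ¬ lst.getD i 0 < prev) := by
  intro fuel
  induction fuel with
  | zero =>
    intro lo hi hfuel hlohi hhi hlow hhigh _
    have : lo = hi := by omega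
    subst this
    exact ⟨by rw [nmBsearch]; omega, by rw [nmBsearch]; exact hlow, by rw [nmBsearch]; exact hhigh⟩
  | succ fuel ih =>
    intro lo hi hfuel hlohi hhi hlow hhigh hmono
    rw [nmBsearch]
    by_cases hlt : lo < hi
    · rw [if_pos hlt]
      simp only []
      by_cases hmid : lst.getD ((lo + hi) / 2) 0 < prev
      · rw [if_pos hmid]
        apply ih _ _ (by omega) (by omega) hhi _ hhigh hmono
        intro i hi'
        exact lt_of_le_of_lt (hmono i ((lo + hi) / 2) (by omega) (by omega)) hmid
      · rw [if_neg hmid]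
        apply ih _ _ (by omega) (by omega) (by omega) hlow _ hmono
        intro i hge hilen habs
        exact hmid (lt_of_le_of_lt (hmono ((lo + hi) / 2) i hge hilen) habs)
    · rw [if_neg hlt]
      have : lo = hi := by omega
      subst this
      exact ⟨by omega, hlow, hhigh⟩

theorem loopB_eq_scan (nm : List Char) (pattern : List Char) :
    ∀ (k : Nat), k ≤ nm.length →
      nmLoopB (nmPosDict nm) pattern (k : Int) = nmScan pattern (nm.drop k) := by
  induction pattern with
  | nil => intro k hk; rw [nmLoopB, nmScan]
  | cons c rest ih =>
    intro k hk
    rw [nmLoopB]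
    by_cases hnone : (nmPosDict nm).get? c = none
    · have hmem : c ∉ nm := (nmPosDict_get?_eq_none nm c).1 hnone
      rw [hnone]
      rw [nmScan_not_mem c rest _ (fun h => hmem (List.mem_of_mem_drop h))]
    · obtain ⟨lst, hsome⟩ := Option.ne_none_iff_exists'.1 hnone
      rw [hsome]
      have hlst : lst = nmPosL nm c := by
        have := nmPosDict_getD nm c
        rw [PySem.Dict.getD_eq_get?_getD, hsome] at this
        simpa using this
      subst hlst
      simp only []
      obtain ⟨hr_le, hr_low, hr_high⟩ :=
        nmBsearch_spec (nmPosL nm c) (k : Int) (nmPosL nm c).length 0 (nmPosL nm c).length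
          (by omega) (by omega) (le_refl _)
          (by omega) (by omega) (fun i j hij hj => nmPosL_mono nm c hij hj)
      set r := nmBsearch (nmPosL nm c) (k : Int) (nmPosL nm c).length 0 (nmPosL nm c).length
        with hrdef
      by_cases hrlen : r = (nmPosL nm c).length
      · rw [if_pos hrlen]
        -- every occurrence of c lies below k: c ∉ nm.drop k
        have hnotmem : c ∉ nm.drop k := by
          intro hmem
          obtain ⟨j', hj', hget⟩ := List.mem_iff_getElem.1 hmem
          have hjlen : k + j' < nm.length := by
            rw [List.length_drop] at hj'; omega
          have hx : ((k + j' : Nat) : Int) ∈ nmPosL nm c := by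
            rw [mem_nmPosL]
            exact ⟨k + j', hjlen, rfl, by rw [← List.getElem_drop]; exact hget⟩
          obtain ⟨t, ht, hteq⟩ := List.mem_iff_getElem.1 hx
          have := hr_low t (by omega)
          rw [List.getD_eq_getElem _ _ ht, hteq] at this
          omega
        rw [nmScan_not_mem c rest _ hnotmem]
      · rw [if_neg hrlen]
        have hrlt : r < (nmPosL nm c).length := by omega
        -- j := L[r] is the first occurrence of c at position ≥ k
        have hjmem : (nmPosL nm c).getD r 0 ∈ nmPosL nm c := by
          rw [List.getD_eq_getElem _ _ hrlt]; exact List.getElem_mem _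
        obtain ⟨jn, hjn, hjeq, hjc⟩ := (mem_nmPosL nm c _).1 hjmem
        have hjk : (k : Int) ≤ (nmPosL nm c).getD r 0 := by
          have := hr_high r (le_refl _) hrlt; omega
        have hjkn : k ≤ jn := by omega
        -- minimality: no occurrence of c in [k, jn)
        have hminN : ∀ i, k ≤ i → i < jn → ∀ (h : i < nm.length), nm[i] ≠ c := by
          intro i hki hijn hilen hic
          have hx : ((i : Nat) : Int) ∈ nmPosL nm c := by
            rw [mem_nmPosL]; exact ⟨i, hilen, rfl, hic⟩
          obtain ⟨t, ht, hteq⟩ := List.mem_iff_getElem.1 hx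
          have htr : t < r := by
            by_contra hge
            have := nmPosL_mono nm c (Nat.le_of_not_lt hge) ht
            rw [List.getD_eq_getElem _ _ ht, hteq] at this
            omega
          have := hr_low t htr
          rw [List.getD_eq_getElem _ _ ht, hteq] at this
          omega
        -- apply nmScan_first with local index jn - k in nm.drop k
        have hlocal : jn - k < (nm.drop k).length := by
          rw [List.length_drop]; omega
        have hgetl : (nm.drop k)[jn - k]'hlocal = c := by
          rw [List.getElem_drop]
          have : k + (jn - k) = jn := by omega
          simp_rw [this]; exact hjc
        have hminl : ∀ i (hi : i < jn - k), (nm.drop k)[i]'(by omega) ≠ c := by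
          intro i hi
          rw [List.getElem_drop]
          exact hminN (k + i) (by omega) (by omega) _
        rw [nmScan_first c rest (nm.drop k) (jn - k) hlocal hgetl hminl]
        rw [List.drop_drop, show k + (jn - k + 1) = jn + 1 from by omega]
        have hcast : (nmPosL nm c).getD r 0 + 1 = ((jn + 1 : Nat) : Int) := by
          rw [hjeq]; push_cast; ring
        rw [hcast, ih (jn + 1) (by omega)]

-- ===== VERDICT (by name: the statement is the Claim_ definition above) =====
theorem name_match_spec : Claim_equal_name_match := by
  intro pattern name _
  unfold Spec_name_match name_match name_match_alt
  simp only []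
  rw [show (0 : Int) = ((0 : Nat) : Int) by rfl]
  rw [loopA_eq_scan _ _ 0 (by omega), loopB_eq_scan _ _ 0 (by omega)]
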